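-- pv_equiv track=rewrite | github.com/a-dubs/portfolio.alecwarren.com | github automation/portfolio_maker.py | get_nonempty_lines
-- ===== SOURCE A (Python) =====
-- def get_nonempty_lines(readme : str) -> str:
--     lines = [l for l in readme.splitlines() if l.strip() != "<br>" and l.strip() != '']
--     commented = False
--     non_comment_lines = []
--     for l in lines:
--         if "<!--" in l:
--             commented = True
--         if not commented and l.strip()[:2] != "//":
--             non_comment_lines.append(l)
--         if commented and "-->" in l:
--             commented = False
--     return non_comment_lines
-- ===== SOURCE B (Python) =====
-- def get_nonempty_lines(readme: str) -> str:
--     # Two-pass decomposition: first mark every raw line as inside/outside an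
--     # HTML comment block, then filter in one comprehension over the raw lines.
--     lines = readme.splitlines()
--     excluded = []
--     commented = False
--     for l in lines:
--         if "<!--" in l:
--             commented = True
--         excluded.append(commented)
--         if commented and "-->" in l:
--             commented = False
--     return [l for l, ex in zip(lines, excluded)
--             if not ex and (s := l.strip()) != '' and s != '<br>'
--             and not s.startswith('//')]
-- ===== Notes on version B (the rewrite author's own statement) =====
-- stated objective: alternative
-- what changed: A interleaves filtering and the comment-state machine in one fused loop over pre-filtered lines; B first marks each raw line of splitlines() as inside/outside a comment block, then selects lines in a single separate comprehension (filter order reversed).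
import Mathlib
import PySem

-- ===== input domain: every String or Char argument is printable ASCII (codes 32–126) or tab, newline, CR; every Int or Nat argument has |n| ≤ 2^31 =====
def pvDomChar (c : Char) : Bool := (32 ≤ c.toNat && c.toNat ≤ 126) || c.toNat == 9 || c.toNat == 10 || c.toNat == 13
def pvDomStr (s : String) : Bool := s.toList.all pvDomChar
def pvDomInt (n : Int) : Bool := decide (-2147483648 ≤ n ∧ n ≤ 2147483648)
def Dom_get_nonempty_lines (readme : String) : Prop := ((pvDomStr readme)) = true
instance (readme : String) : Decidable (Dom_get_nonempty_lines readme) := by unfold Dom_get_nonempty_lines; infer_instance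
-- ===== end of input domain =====

-- B replaces A's fused filter+state-machine loop by two separate passes (mark comment-block
-- membership per raw line, then filter once); same behaviour, no speed claim.


-- ===== PORT A =====
def get_nonempty_lines (readme : String) : List String :=
  let lines := (PySem.Str.splitlines readme).filter
      (fun l => PySem.Str.strip l != "<br>" && PySem.Str.strip l != "")
  (lines.foldl (fun (st : Bool × List String) l =>
      let commented := if PySem.Str.isIn "<!--" l then true else st.1
      let acc := if !commented && (PySem.Str.slice (PySem.Str.strip l) none (some 2) != "//")
                 then st.2 ++ [l] else st.2
      let commented := if commented && PySem.Str.isIn "-->" l then false else commented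
      (commented, acc)) (false, [])).2

-- ===== PORT B =====
def get_nonempty_lines_alt (readme : String) : List String :=
  let lines := PySem.Str.splitlines readme
  let excluded := (lines.foldl (fun (st : Bool × List Bool) l =>
      let c := if PySem.Str.isIn "<!--" l then true else st.1
      let ex := st.2 ++ [c]
      let c := if c && PySem.Str.isIn "-->" l then false else c
      (c, ex)) (false, [])).2
  ((lines.zip excluded).filter (fun p =>
      !p.2 && (PySem.Str.strip p.1 != "") && (PySem.Str.strip p.1 != "<br>")
        && !(PySem.Str.startswith (PySem.Str.strip p.1) "//"))).map (·.1)

-- ===== PRECONDITION & SPEC =====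
def Spec_get_nonempty_lines (readme : String) (out : List String) : Prop := out = get_nonempty_lines_alt readme
instance (readme : String) (out : List String) : Decidable (Spec_get_nonempty_lines readme out) := by unfold Spec_get_nonempty_lines; infer_instance

-- ===== CLAIM (what is proved, stated in full; the proofs are below) =====
def Claim_equal_get_nonempty_lines : Prop := ∀ (readme : String), Dom_get_nonempty_lines readme → Spec_get_nonempty_lines readme (get_nonempty_lines readme)

-- ===== LEMMAS AND PROOFS =====

-- A's loop, recursively (output-producing state machine over the pre-filtered lines)
def runA : List String → Bool → List String
  | [], _ => []
  | l :: ls, c =>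
    let c1 := if PySem.Str.isIn "<!--" l then true else c
    (if !c1 && (PySem.Str.slice (PySem.Str.strip l) none (some 2) != "//") then [l] else []) ++
      runA ls (if c1 && PySem.Str.isIn "-->" l then false else c1)

-- B's flag loop, recursively
def runB : List String → Bool → List Bool
  | [], _ => []
  | l :: ls, c =>
    let c1 := if PySem.Str.isIn "<!--" l then true else c
    c1 :: runB ls (if c1 && PySem.Str.isIn "-->" l then false else c1)

theorem foldA (ls : List String) (c : Bool) (acc : List String) :
    (ls.foldl (fun (st : Bool × List String) l =>
      let commented := if PySem.Str.isIn "<!--" l then true else st.1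
      let acc := if !commented && (PySem.Str.slice (PySem.Str.strip l) none (some 2) != "//")
                 then st.2 ++ [l] else st.2
      let commented := if commented && PySem.Str.isIn "-->" l then false else commented
      (commented, acc)) (c, acc)).2 = acc ++ runA ls c := by
  induction ls generalizing c acc with
  | nil => simp [runA]
  | cons l ls ih => simp only [List.foldl_cons, runA, ih]; split_ifs <;> simp

theorem foldB (ls : List String) (c : Bool) (acc : List Bool) :
    (ls.foldl (fun (st : Bool × List Bool) l =>
      let c := if PySem.Str.isIn "<!--" l then true else st.1
      let ex := st.2 ++ [c]
      let c := if c && PySem.Str.isIn "-->" l then false else c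
      (c, ex)) (c, acc)).2 = acc ++ runB ls c := by
  induction ls generalizing c acc with
  | nil => simp [runB]
  | cons l ls ih => simp only [List.foldl_cons, runB, ih]; split_ifs <;> simp

-- a non-space character of l survives strip
theorem mem_strip_of_mem {l : List Char} {ch : Char} (h : ch ∈ l)
    (hs : PySem.Chars.isspace ch = false) : ch ∈ PySem.Chars.strip l := by
  unfold PySem.Chars.strip PySem.Chars.lstrip PySem.Chars.rstrip
  have hsplit := List.takeWhile_append_dropWhile (p := PySem.Chars.isspace) (l := l)
  have h1 : ch ∈ List.dropWhile PySem.Chars.isspace l := by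
    rcases List.mem_append.mp (hsplit ▸ h) with h' | h'
    · rw [List.mem_takeWhile_imp h'] at hs; exact absurd hs (by simp)
    · exact h'
  rw [List.mem_reverse]
  have hsplit2 := List.takeWhile_append_dropWhile (p := PySem.Chars.isspace)
      (l := (List.dropWhile PySem.Chars.isspace l).reverse)
  rcases List.mem_append.mp (hsplit2 ▸ List.mem_reverse.mpr h1) with h' | h'
  · rw [List.mem_takeWhile_imp h'] at hs; exact absurd hs (by simp)
  · exact h'

-- lines filtered out by A (strip = "" or "<br>") contain neither comment marker
theorem no_markers {l : String}
    (h : (PySem.Str.strip l != "<br>" && PySem.Str.strip l != "") = false) :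
    PySem.Str.isIn "<!--" l = false ∧ PySem.Str.isIn "-->" l = false := by
  have hstrip : PySem.Chars.strip l.toList = "<br>".toList ∨ PySem.Chars.strip l.toList = [] := by
    simp only [Bool.and_eq_false_iff, bne_eq_false_iff_eq] at h
    rcases h with h | h
    · left; rw [← PySem.Str.toList_strip, h]
    · right; rw [← PySem.Str.toList_strip, h]; decide
  constructor
  · rw [PySem.Str.isIn]
    apply (PySem.Chars.isIn_eq_false_iff _ _).mpr
    intro hinf
    have hmem : '!' ∈ l.toList := hinf.mem (by decide)
    have := mem_strip_of_mem hmem (by decide)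
    rcases hstrip with h | h <;> rw [h] at this <;> revert this <;> decide
  · rw [PySem.Str.isIn]
    apply (PySem.Chars.isIn_eq_false_iff _ _).mpr
    intro hinf
    have hmem : '-' ∈ l.toList := hinf.mem (by decide)
    have := mem_strip_of_mem hmem (by decide)
    rcases hstrip with h | h <;> rw [h] at this <;> revert this <;> decide

-- A's slice test is B's startswith test
theorem slice_eq_startswith (s : String) :
    (PySem.Str.slice s none (some 2) != "//") = !(PySem.Str.startswith s "//") := by
  have h2 : (some (2 : Int)) = some (((2 : Nat) : Int)) := by norm_num
  have : (PySem.Str.slice s none (some 2) = "//") ↔ (PySem.Str.startswith s "//" = true) := by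
    rw [String.ext_iff, PySem.Str.toList_slice, PySem.Str.startswith_eq,
        PySem.Chars.startswith_iff, List.prefix_iff_eq_take,
        PySem.Chars.slice_eq_listSlice, h2, PySem.List.slice_to_natCast]
    constructor <;> intro h <;> simp_all
  have ht : ("//" : String).toList = ['/', '/'] := by decide
  cases hb : PySem.Chars.startswith s.toList ['/', '/'] <;>
    simp [hb] at this <;>
    simp [PySem.Str.startswith_eq, ht, hb, this]

-- main invariant: A's machine over the filtered lines = B's mark-then-filter over all lines
theorem main_inv (ls : List String) (c : Bool) :
    runA (ls.filter (fun l => PySem.Str.strip l != "<br>" && PySem.Str.strip l != "")) c =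
      ((ls.zip (runB ls c)).filter (fun p =>
        !p.2 && (PySem.Str.strip p.1 != "") && (PySem.Str.strip p.1 != "<br>")
          && !(PySem.Str.startswith (PySem.Str.strip p.1) "//"))).map (·.1) := by
  induction ls generalizing c with
  | nil => simp [runA, runB]
  | cons l ls ih =>
    simp only [List.filter_cons, List.zip_cons_cons, runB]
    by_cases hk : (PySem.Str.strip l != "<br>" && PySem.Str.strip l != "") = true
    · have hks : (PySem.Str.strip l != "") = true ∧ (PySem.Str.strip l != "<br>") = true := by
        simp only [Bool.and_eq_true] at hk; exact ⟨hk.2, hk.1⟩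
      rw [if_pos (by simpa using hk)]
      simp only [runA, slice_eq_startswith, hks.1, hks.2, ih]
      split_ifs with h1 h2 <;> simp_all
    · have hk' : (PySem.Str.strip l != "<br>" && PySem.Str.strip l != "") = false := by
        simpa using hk
      obtain ⟨ho, hc⟩ := no_markers hk'
      rw [if_neg (by simpa using hk)]
      simp only [ho, hc]
      have hor : (PySem.Str.strip l != "") = false ∨ (PySem.Str.strip l != "<br>") = false := by
        rcases Bool.and_eq_false_iff.mp hk' with h | h
        · right; exact h
        · left; exact h
      rw [ih]
      rcases hor with h | h <;> simp [h]

-- ===== VERDICT (by name: the statement is the Claim_ definition above) =====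
theorem get_nonempty_lines_spec : Claim_equal_get_nonempty_lines := by
  intro readme _
  unfold Spec_get_nonempty_lines get_nonempty_lines get_nonempty_lines_alt
  simp only [foldA, foldB, List.nil_append]
  exact main_inv (PySem.Str.splitlines readme) false
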